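-- pv_equiv track=rewrite | github.com/shulabhb/MediVise | backend/app/llm_service_backup.py | _soften_imperatives
-- ===== SOURCE A (Python) =====
-- def _soften_imperatives(text: str) -> str:
--     try:
--         repl = {
--             "Avoid driving": "Try to avoid driving",
--             "Do not drive": "Try not to drive",
--             "You must": "You may need to",
--             "You should": "You might",
--             "Start ": "Your care team may start ",
--             "Stop ": "Your care team may adjust or stop ",
--         }
--         out = text
--         for k, v in repl.items():
--             out = out.replace(k, v)
--         return out
--     except Exception:
--         return text
-- ===== SOURCE B (Python) =====
-- def _soften_imperatives(text: str) -> str: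
--     # Single left-to-right scan: at each position try the six keys in order,
--     # emit the replacement and skip the key on a match, else copy one char.
--     try:
--         repl = [
--             ("Avoid driving", "Try to avoid driving"),
--             ("Do not drive", "Try not to drive"),
--             ("You must", "You may need to"),
--             ("You should", "You might"),
--             ("Start ", "Your care team may start "),
--             ("Stop ", "Your care team may adjust or stop "),
--         ]
--         parts = []
--         i = 0
--         n = len(text)
--         while i < n:
--             for k, v in repl:
--                 if text.startswith(k, i):
--                     parts.append(v)
--                     i += len(k)
--                     break
--             else:
--                 parts.append(text[i])
--                 i += 1
--         return "".join(parts)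
--     except Exception:
--         return text
-- ===== Notes on version B (the rewrite author's own statement) =====
-- stated objective: alternative
-- what changed: Replaces six sequential full-text str.replace passes with one left-to-right scan that tries the six keys in order at each position and emits the replacement or the character.
import Mathlib
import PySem

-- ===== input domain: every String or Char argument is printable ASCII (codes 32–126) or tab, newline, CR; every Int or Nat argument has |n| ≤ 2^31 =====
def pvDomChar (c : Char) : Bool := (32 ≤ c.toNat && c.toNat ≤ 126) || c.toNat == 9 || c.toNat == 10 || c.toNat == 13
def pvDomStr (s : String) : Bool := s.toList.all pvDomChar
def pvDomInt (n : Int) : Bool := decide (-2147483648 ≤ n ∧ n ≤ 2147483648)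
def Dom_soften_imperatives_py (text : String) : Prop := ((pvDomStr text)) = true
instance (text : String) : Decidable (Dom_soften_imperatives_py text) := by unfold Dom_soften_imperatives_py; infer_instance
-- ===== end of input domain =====

-- B replaces A's six sequential full-text str.replace passes with one left-to-right
-- scan trying the six keys in order at each position (alternative decomposition, same result).

-- ===== PORT A =====
-- the dict literal of A (distinct keys, iterated in insertion order)
def pvReplA : PySem.Dict String String :=
  (((((((PySem.Dict.mk []).insert "Avoid driving" "Try to avoid driving").insert
    "Do not drive" "Try not to drive").insert
    "You must" "You may need to").insert
    "You should" "You might").insert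
    "Start " "Your care team may start ").insert
    "Stop " "Your care team may adjust or stop ")

-- A: out = text; for k, v in repl.items(): out = out.replace(k, v); return out
-- (the try/except never fires: str.replace raises on no str input)
def soften_imperatives_py (text : String) : String :=
  pvReplA.items.foldl (fun out kv => PySem.Str.replace out kv.1 kv.2) text

-- ===== PORT B =====
-- B's six (key, replacement) pairs, as lists of chars
def pvK1 : List Char := "Avoid driving".toList
def pvV1 : List Char := "Try to avoid driving".toList
def pvK2 : List Char := "Do not drive".toList
def pvV2 : List Char := "Try not to drive".toList
def pvK3 : List Char := "You must".toList
def pvV3 : List Char := "You may need to".toList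
def pvK4 : List Char := "You should".toList
def pvV4 : List Char := "You might".toList
def pvK5 : List Char := "Start ".toList
def pvV5 : List Char := "Your care team may start ".toList
def pvK6 : List Char := "Stop ".toList
def pvV6 : List Char := "Your care team may adjust or stop ".toList

def pvTable : List (List Char × List Char) :=
  [(pvK1, pvV1), (pvK2, pvV2), (pvK3, pvV3), (pvK4, pvV4), (pvK5, pvV5), (pvK6, pvV6)]

-- every key in the table is nonempty (needed for termination of the scan)
theorem pvTable_key_len : ∀ kv ∈ pvTable, 1 ≤ kv.1.length := by decide

-- B's while-loop: at each position try the keys in order (the for/break/else = find?),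
-- emit the replacement and skip the key on a match, else copy one char
def pvScan (cs : List Char) : List Char :=
  match hf : pvTable.find? (fun kv => kv.1.isPrefixOf cs) with
  | some kv => kv.2 ++ pvScan (cs.drop kv.1.length)
  | none =>
    match cs with
    | [] => []
    | c :: t => c :: pvScan t
termination_by cs.length
decreasing_by
  · have hp : (fun kv : List Char × List Char => kv.1.isPrefixOf cs) kv = true :=
      List.find?_some (p := fun kv : List Char × List Char => kv.1.isPrefixOf cs) hf
    simp only at hp
    have hpre : kv.1 <+: cs := List.isPrefixOf_iff_prefix.mp hp
    have h1 : 1 ≤ kv.1.length := pvTable_key_len kv (List.mem_of_find?_eq_some hf)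
    have hle : kv.1.length ≤ cs.length := hpre.length_le
    simp only [List.length_drop]
    omega
  · simp only [List.length_cons]
    omega

def soften_imperatives_py_alt (text : String) : String :=
  String.ofList (pvScan text.toList)

-- ===== PRECONDITION & SPEC =====
def Spec_soften_imperatives_py (text : String) (out : String) : Prop := out = soften_imperatives_py_alt text
instance (text : String) (out : String) : Decidable (Spec_soften_imperatives_py text out) := by unfold Spec_soften_imperatives_py; infer_instance

-- ===== CLAIM (what is proved, stated in full; the proofs are below) =====
def Claim_equal_soften_imperatives_py : Prop := ∀ (text : String), Dom_soften_imperatives_py text → Spec_soften_imperatives_py text (soften_imperatives_py text)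

-- ===== LEMMAS AND PROOFS =====

-- clean fueled form of Python str.replace's scan (PySem.Chars.replace.go without accumulator)
def pvRepF (k v : List Char) : Nat → List Char → List Char
  | 0, l => l
  | _ + 1, [] => []
  | f + 1, c :: t =>
    if k.isPrefixOf (c :: t) then v ++ pvRepF k v f ((c :: t).drop k.length)
    else c :: pvRepF k v f t

theorem pvGo_eq_repF (k v : List Char) (hk : k ≠ []) :
    ∀ (fuel : Nat) (l acc : List Char), l.length ≤ fuel →
      PySem.Chars.replace.go k v fuel l acc = acc.reverse ++ pvRepF k v fuel l := by
  intro fuel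
  induction fuel with
  | zero =>
    intro l acc hl
    have : l = [] := List.eq_nil_of_length_eq_zero (Nat.le_zero.mp hl)
    subst this
    simp [PySem.Chars.replace.go, pvRepF]
  | succ f ih =>
    intro l acc hl
    cases l with
    | nil => simp [PySem.Chars.replace.go, pvRepF]
    | cons c t =>
      by_cases hpre : k.isPrefixOf (c :: t) = true
      · have hk1 : 1 ≤ k.length := by
          cases k with
          | nil => exact absurd rfl hk
          | cons a b => simp
        have hlen : ((c :: t).drop k.length).length ≤ f := by
          simp only [List.length_drop, List.length_cons] at *
          omega
        simp only [PySem.Chars.replace.go, pvRepF]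
        rw [if_pos hpre, if_pos hpre, ih _ _ hlen]
        simp
      · have hlen : t.length ≤ f := by
          simp only [List.length_cons] at hl
          omega
        simp only [PySem.Chars.replace.go, pvRepF]
        rw [if_neg hpre, if_neg hpre, ih _ _ hlen]
        simp

theorem pvRepF_fuel_irrel (k v : List Char) (hk : k ≠ []) :
    ∀ (f f' : Nat) (l : List Char), l.length ≤ f → l.length ≤ f' →
      pvRepF k v f l = pvRepF k v f' l := by
  have hk1 : 1 ≤ k.length := by
    cases k with
    | nil => exact absurd rfl hk
    | cons a b => simp
  intro f
  induction f with
  | zero =>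
    intro f' l hf hf'
    have : l = [] := List.eq_nil_of_length_eq_zero (Nat.le_zero.mp hf)
    subst this
    cases f' <;> simp [pvRepF]
  | succ f ih =>
    intro f' l hf hf'
    cases l with
    | nil => cases f' <;> simp [pvRepF]
    | cons c t =>
      cases f' with
      | zero => simp at hf'
      | succ f'' =>
        simp only [pvRepF]
        by_cases hpre : k.isPrefixOf (c :: t) = true
        · rw [if_pos hpre, if_pos hpre]
          congr 1
          apply ih
          · simp only [List.length_drop, List.length_cons] at *; omega
          · simp only [List.length_drop, List.length_cons] at *; omega
        · rw [if_neg hpre, if_neg hpre]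
          congr 1
          apply ih
          · simp only [List.length_cons] at hf; omega
          · simp only [List.length_cons] at hf'; omega

-- Python str.replace (nonempty pattern) as the clean fueled scan
def pvRep (k v l : List Char) : List Char := pvRepF k v l.length l

theorem pvReplace_eq_rep (k v l : List Char) (hk : k ≠ []) :
    PySem.Chars.replace l k v = pvRep k v l := by
  have hne : k.isEmpty = false := by cases k with
    | nil => exact absurd rfl hk
    | cons a b => rfl
  simp only [PySem.Chars.replace, hne, Bool.false_eq_true, if_false]
  rw [pvGo_eq_repF k v hk l.length l [] (Nat.le_refl _)]
  simp [pvRep]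

theorem pvRep_nil (k v : List Char) : pvRep k v [] = [] := by
  simp [pvRep, pvRepF]

theorem pvRep_pos (k v l : List Char) (hk : k ≠ []) (h : k <+: l) :
    pvRep k v l = v ++ pvRep k v (l.drop k.length) := by
  have hk1 : 1 ≤ k.length := by
    cases k with
    | nil => exact absurd rfl hk
    | cons a b => simp
  cases l with
  | nil =>
    exact absurd (List.prefix_nil.mp h) hk
  | cons c t =>
    have hpre : k.isPrefixOf (c :: t) = true := List.isPrefixOf_iff_prefix.mpr h
    simp only [pvRep, List.length_cons, pvRepF]
    rw [if_pos hpre]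
    congr 1
    apply pvRepF_fuel_irrel k v hk
    · simp only [List.length_drop, List.length_cons]; omega
    · exact Nat.le_refl _

theorem pvRep_neg (k v : List Char) (c : Char) (t : List Char) (h : ¬ k <+: (c :: t)) :
    pvRep k v (c :: t) = c :: pvRep k v t := by
  have hpre : ¬ k.isPrefixOf (c :: t) = true := by
    intro hcon
    exact h (List.isPrefixOf_iff_prefix.mp hcon)
  simp only [pvRep, List.length_cons, pvRepF]
  rw [if_neg hpre]

-- a prefix of s ++ b either lies inside s or swallows all of s
theorem pvPrefix_append_cases {α : Type} (k s b : List α) (h : k <+: s ++ b) :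
    k <+: s ∨ s <+: k :=
  List.prefix_or_prefix_of_prefix h (List.prefix_append s b)

-- inertness: if k can never start inside a (for any continuation), replace skips a
theorem pvRep_split (k v a b : List Char)
    (h : ∀ j, j < a.length → ¬ k <+: a.drop j ∧ ¬ a.drop j <+: k) :
    pvRep k v (a ++ b) = a ++ pvRep k v b := by
  induction a with
  | nil => simp
  | cons c a' ih =>
    have h0 := h 0 (by simp)
    simp only [List.drop_zero] at h0
    have hnot : ¬ k <+: (c :: a') ++ b := by
      intro hcon
      rcases pvPrefix_append_cases k (c :: a') b hcon with hc | hc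
      · exact h0.1 hc
      · exact h0.2 hc
    rw [List.cons_append, pvRep_neg k v c (a' ++ b) (by simpa using hnot)]
    rw [ih (fun j hj => by simpa using h (j + 1) (by simpa using Nat.succ_lt_succ hj))]
    simp

-- all-lowercase lists cannot begin a replacement (replacements start with a capital)
def pvNoCap (p : List Char) : Bool := p.all (fun c => !('A' ≤ c && c ≤ 'Z'))

def pvCapHead : List Char → Bool
  | [] => false
  | c :: _ => 'A' ≤ c && c ≤ 'Z'

theorem pvRep_noCap_prefix (k v : List Char) (hk : k ≠ []) (hv : pvCapHead v = true) :
    ∀ (t p : List Char), pvNoCap p = true → p <+: pvRep k v t → p <+: t := by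
  suffices H : ∀ (n : Nat) (t p : List Char), t.length ≤ n →
      pvNoCap p = true → p <+: pvRep k v t → p <+: t by
    intro t p hp hpre
    exact H t.length t p (Nat.le_refl _) hp hpre
  intro n
  induction n with
  | zero =>
    intro t p ht hp hpre
    have : t = [] := List.eq_nil_of_length_eq_zero (Nat.le_zero.mp ht)
    subst this
    rw [pvRep_nil] at hpre
    exact hpre
  | succ n ih =>
    intro t p ht hp hpre
    cases p with
    | nil => exact List.nil_prefix
    | cons pc pt =>
      cases t with
      | nil =>
        rw [pvRep_nil] at hpre
        simp at hpre
      | cons c t' =>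
        by_cases hm : k <+: (c :: t')
        · exfalso
          rw [pvRep_pos k v _ hk hm] at hpre
          cases v with
          | nil => simp [pvCapHead] at hv
          | cons vc v' =>
            have hpc : pc = vc := (List.cons_prefix_cons.mp hpre).1
            subst hpc
            simp only [pvNoCap, List.all_cons, Bool.and_eq_true, Bool.not_eq_true'] at hp
            simp only [pvCapHead] at hv
            rw [hp.1] at hv
            exact Bool.false_ne_true hv
        · rw [pvRep_neg k v c t' hm] at hpre
          have h2 := List.cons_prefix_cons.mp hpre
          have hps : pvNoCap pt = true := by
            simp only [pvNoCap, List.all_cons, Bool.and_eq_true] at hp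
            exact hp.2
          have hlen : t'.length ≤ n := by
            simp only [List.length_cons] at ht
            omega
          exact List.cons_prefix_cons.mpr ⟨h2.1, ih t' pt hlen hps h2.2⟩

-- A's chain of six replaces, on char lists
def pvChain (l : List Char) : List Char :=
  pvRep pvK6 pvV6 (pvRep pvK5 pvV5 (pvRep pvK4 pvV4 (pvRep pvK3 pvV3
    (pvRep pvK2 pvV2 (pvRep pvK1 pvV1 l)))))

-- decidable inertness of a list w.r.t. a key
def pvOkB (k a : List Char) : Bool :=
  (List.range a.length).all (fun j => !(k.isPrefixOf (a.drop j)) && !((a.drop j).isPrefixOf k))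

theorem pvOk_spec (k a : List Char) (h : pvOkB k a = true) :
    ∀ j, j < a.length → ¬ k <+: a.drop j ∧ ¬ a.drop j <+: k := by
  intro j hj
  simp only [pvOkB, List.all_eq_true, List.mem_range] at h
  have := h j hj
  simp only [Bool.and_eq_true, Bool.not_eq_true'] at this
  constructor
  · intro hc; rw [List.isPrefixOf_iff_prefix.mpr hc] at this; simp at this
  · intro hc; rw [List.isPrefixOf_iff_prefix.mpr hc] at this; simp at this

theorem pvNotPrefixAppend (k a b : List Char) (h1 : ¬ k <+: a) (h2 : ¬ a <+: k) :
    ¬ k.isPrefixOf (a ++ b) = true := by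
  intro hc
  rcases pvPrefix_append_cases k a b (List.isPrefixOf_iff_prefix.mp hc) with hx | hx
  · exact h1 hx
  · exact h2 hx

-- ---- scan equations ----

theorem pvScan_nil : pvScan [] = [] := by
  rw [pvScan]
  split
  · rename_i kv hf
    have hp : (fun kv : List Char × List Char => kv.1.isPrefixOf ([] : List Char)) kv = true :=
      List.find?_some (p := fun kv : List Char × List Char => kv.1.isPrefixOf ([] : List Char)) hf
    simp only at hp
    have h1 := pvTable_key_len kv (List.mem_of_find?_eq_some hf)
    have hnil := List.prefix_nil.mp (List.isPrefixOf_iff_prefix.mp hp)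
    rw [hnil] at h1
    simp at h1
  · rfl

theorem pvScan_cons_neg (c : Char) (t : List Char)
    (h1 : ¬ pvK1 <+: (c :: t)) (h2 : ¬ pvK2 <+: (c :: t)) (h3 : ¬ pvK3 <+: (c :: t))
    (h4 : ¬ pvK4 <+: (c :: t)) (h5 : ¬ pvK5 <+: (c :: t)) (h6 : ¬ pvK6 <+: (c :: t)) :
    pvScan (c :: t) = c :: pvScan t := by
  have hn : pvTable.find? (fun kv => kv.1.isPrefixOf (c :: t)) = none := by
    rw [List.find?_eq_none]
    intro kv hm
    simp only [pvTable, List.mem_cons] at hm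
    rcases hm with rfl | rfl | rfl | rfl | rfl | rfl | hm
    · simpa using fun hc => h1 (List.isPrefixOf_iff_prefix.mp hc)
    · simpa using fun hc => h2 (List.isPrefixOf_iff_prefix.mp hc)
    · simpa using fun hc => h3 (List.isPrefixOf_iff_prefix.mp hc)
    · simpa using fun hc => h4 (List.isPrefixOf_iff_prefix.mp hc)
    · simpa using fun hc => h5 (List.isPrefixOf_iff_prefix.mp hc)
    · simpa using fun hc => h6 (List.isPrefixOf_iff_prefix.mp hc)
    · simp at hm
  rw [pvScan]
  split
  · rename_i kv hf
    rw [hn] at hf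
    exact absurd hf (by simp)
  · rfl

theorem pvScan_app1 (r : List Char) : pvScan (pvK1 ++ r) = pvV1 ++ pvScan r := by
  have hf : pvTable.find? (fun kv => kv.1.isPrefixOf (pvK1 ++ r)) = some (pvK1, pvV1) := by
    rw [pvTable]
    rw [List.find?_cons_of_pos]
    · exact List.isPrefixOf_iff_prefix.mpr (List.prefix_append _ _)
  rw [pvScan]
  split
  · rename_i kv hf2
    rw [hf] at hf2
    injection hf2 with hkv
    subst hkv
    rw [List.drop_left]
  · rename_i hf2
    rw [hf] at hf2
    exact absurd hf2 (by simp)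

theorem pvChain_app1 (r : List Char) : pvChain (pvK1 ++ r) = pvV1 ++ pvChain r := by
  unfold pvChain
  rw [pvRep_pos pvK1 pvV1 _ (by decide) (List.prefix_append _ _), List.drop_left]
  rw [pvRep_split pvK2 pvV2 pvV1 _ (pvOk_spec _ _ (by decide))]
  rw [pvRep_split pvK3 pvV3 pvV1 _ (pvOk_spec _ _ (by decide))]
  rw [pvRep_split pvK4 pvV4 pvV1 _ (pvOk_spec _ _ (by decide))]
  rw [pvRep_split pvK5 pvV5 pvV1 _ (pvOk_spec _ _ (by decide))]
  rw [pvRep_split pvK6 pvV6 pvV1 _ (pvOk_spec _ _ (by decide))]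

theorem pvScan_app2 (r : List Char) : pvScan (pvK2 ++ r) = pvV2 ++ pvScan r := by
  have hf : pvTable.find? (fun kv => kv.1.isPrefixOf (pvK2 ++ r)) = some (pvK2, pvV2) := by
    rw [pvTable]
    rw [List.find?_cons_of_neg, List.find?_cons_of_pos]
    · exact List.isPrefixOf_iff_prefix.mpr (List.prefix_append _ _)
    · exact pvNotPrefixAppend pvK1 pvK2 r (by decide) (by decide)
  rw [pvScan]
  split
  · rename_i kv hf2
    rw [hf] at hf2
    injection hf2 with hkv
    subst hkv
    rw [List.drop_left]
  · rename_i hf2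
    rw [hf] at hf2
    exact absurd hf2 (by simp)

theorem pvChain_app2 (r : List Char) : pvChain (pvK2 ++ r) = pvV2 ++ pvChain r := by
  unfold pvChain
  rw [pvRep_split pvK1 pvV1 pvK2 _ (pvOk_spec _ _ (by decide))]
  rw [pvRep_pos pvK2 pvV2 _ (by decide) (List.prefix_append _ _), List.drop_left]
  rw [pvRep_split pvK3 pvV3 pvV2 _ (pvOk_spec _ _ (by decide))]
  rw [pvRep_split pvK4 pvV4 pvV2 _ (pvOk_spec _ _ (by decide))]
  rw [pvRep_split pvK5 pvV5 pvV2 _ (pvOk_spec _ _ (by decide))]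
  rw [pvRep_split pvK6 pvV6 pvV2 _ (pvOk_spec _ _ (by decide))]

theorem pvScan_app3 (r : List Char) : pvScan (pvK3 ++ r) = pvV3 ++ pvScan r := by
  have hf : pvTable.find? (fun kv => kv.1.isPrefixOf (pvK3 ++ r)) = some (pvK3, pvV3) := by
    rw [pvTable]
    rw [List.find?_cons_of_neg, List.find?_cons_of_neg, List.find?_cons_of_pos]
    · exact List.isPrefixOf_iff_prefix.mpr (List.prefix_append _ _)
    · exact pvNotPrefixAppend pvK2 pvK3 r (by decide) (by decide)
    · exact pvNotPrefixAppend pvK1 pvK3 r (by decide) (by decide)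
  rw [pvScan]
  split
  · rename_i kv hf2
    rw [hf] at hf2
    injection hf2 with hkv
    subst hkv
    rw [List.drop_left]
  · rename_i hf2
    rw [hf] at hf2
    exact absurd hf2 (by simp)

theorem pvChain_app3 (r : List Char) : pvChain (pvK3 ++ r) = pvV3 ++ pvChain r := by
  unfold pvChain
  rw [pvRep_split pvK1 pvV1 pvK3 _ (pvOk_spec _ _ (by decide))]
  rw [pvRep_split pvK2 pvV2 pvK3 _ (pvOk_spec _ _ (by decide))]
  rw [pvRep_pos pvK3 pvV3 _ (by decide) (List.prefix_append _ _), List.drop_left]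
  rw [pvRep_split pvK4 pvV4 pvV3 _ (pvOk_spec _ _ (by decide))]
  rw [pvRep_split pvK5 pvV5 pvV3 _ (pvOk_spec _ _ (by decide))]
  rw [pvRep_split pvK6 pvV6 pvV3 _ (pvOk_spec _ _ (by decide))]

theorem pvScan_app4 (r : List Char) : pvScan (pvK4 ++ r) = pvV4 ++ pvScan r := by
  have hf : pvTable.find? (fun kv => kv.1.isPrefixOf (pvK4 ++ r)) = some (pvK4, pvV4) := by
    rw [pvTable]
    rw [List.find?_cons_of_neg, List.find?_cons_of_neg, List.find?_cons_of_neg, List.find?_cons_of_pos]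
    · exact List.isPrefixOf_iff_prefix.mpr (List.prefix_append _ _)
    · exact pvNotPrefixAppend pvK3 pvK4 r (by decide) (by decide)
    · exact pvNotPrefixAppend pvK2 pvK4 r (by decide) (by decide)
    · exact pvNotPrefixAppend pvK1 pvK4 r (by decide) (by decide)
  rw [pvScan]
  split
  · rename_i kv hf2
    rw [hf] at hf2
    injection hf2 with hkv
    subst hkv
    rw [List.drop_left]
  · rename_i hf2
    rw [hf] at hf2
    exact absurd hf2 (by simp)

theorem pvChain_app4 (r : List Char) : pvChain (pvK4 ++ r) = pvV4 ++ pvChain r := by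
  unfold pvChain
  rw [pvRep_split pvK1 pvV1 pvK4 _ (pvOk_spec _ _ (by decide))]
  rw [pvRep_split pvK2 pvV2 pvK4 _ (pvOk_spec _ _ (by decide))]
  rw [pvRep_split pvK3 pvV3 pvK4 _ (pvOk_spec _ _ (by decide))]
  rw [pvRep_pos pvK4 pvV4 _ (by decide) (List.prefix_append _ _), List.drop_left]
  rw [pvRep_split pvK5 pvV5 pvV4 _ (pvOk_spec _ _ (by decide))]
  rw [pvRep_split pvK6 pvV6 pvV4 _ (pvOk_spec _ _ (by decide))]

theorem pvScan_app5 (r : List Char) : pvScan (pvK5 ++ r) = pvV5 ++ pvScan r := by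
  have hf : pvTable.find? (fun kv => kv.1.isPrefixOf (pvK5 ++ r)) = some (pvK5, pvV5) := by
    rw [pvTable]
    rw [List.find?_cons_of_neg, List.find?_cons_of_neg, List.find?_cons_of_neg, List.find?_cons_of_neg, List.find?_cons_of_pos]
    · exact List.isPrefixOf_iff_prefix.mpr (List.prefix_append _ _)
    · exact pvNotPrefixAppend pvK4 pvK5 r (by decide) (by decide)
    · exact pvNotPrefixAppend pvK3 pvK5 r (by decide) (by decide)
    · exact pvNotPrefixAppend pvK2 pvK5 r (by decide) (by decide)
    · exact pvNotPrefixAppend pvK1 pvK5 r (by decide) (by decide)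
  rw [pvScan]
  split
  · rename_i kv hf2
    rw [hf] at hf2
    injection hf2 with hkv
    subst hkv
    rw [List.drop_left]
  · rename_i hf2
    rw [hf] at hf2
    exact absurd hf2 (by simp)

theorem pvChain_app5 (r : List Char) : pvChain (pvK5 ++ r) = pvV5 ++ pvChain r := by
  unfold pvChain
  rw [pvRep_split pvK1 pvV1 pvK5 _ (pvOk_spec _ _ (by decide))]
  rw [pvRep_split pvK2 pvV2 pvK5 _ (pvOk_spec _ _ (by decide))]
  rw [pvRep_split pvK3 pvV3 pvK5 _ (pvOk_spec _ _ (by decide))]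
  rw [pvRep_split pvK4 pvV4 pvK5 _ (pvOk_spec _ _ (by decide))]
  rw [pvRep_pos pvK5 pvV5 _ (by decide) (List.prefix_append _ _), List.drop_left]
  rw [pvRep_split pvK6 pvV6 pvV5 _ (pvOk_spec _ _ (by decide))]

theorem pvScan_app6 (r : List Char) : pvScan (pvK6 ++ r) = pvV6 ++ pvScan r := by
  have hf : pvTable.find? (fun kv => kv.1.isPrefixOf (pvK6 ++ r)) = some (pvK6, pvV6) := by
    rw [pvTable]
    rw [List.find?_cons_of_neg, List.find?_cons_of_neg, List.find?_cons_of_neg, List.find?_cons_of_neg, List.find?_cons_of_neg, List.find?_cons_of_pos]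
    · exact List.isPrefixOf_iff_prefix.mpr (List.prefix_append _ _)
    · exact pvNotPrefixAppend pvK5 pvK6 r (by decide) (by decide)
    · exact pvNotPrefixAppend pvK4 pvK6 r (by decide) (by decide)
    · exact pvNotPrefixAppend pvK3 pvK6 r (by decide) (by decide)
    · exact pvNotPrefixAppend pvK2 pvK6 r (by decide) (by decide)
    · exact pvNotPrefixAppend pvK1 pvK6 r (by decide) (by decide)
  rw [pvScan]
  split
  · rename_i kv hf2
    rw [hf] at hf2
    injection hf2 with hkv
    subst hkv
    rw [List.drop_left]
  · rename_i hf2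
    rw [hf] at hf2
    exact absurd hf2 (by simp)

theorem pvChain_app6 (r : List Char) : pvChain (pvK6 ++ r) = pvV6 ++ pvChain r := by
  unfold pvChain
  rw [pvRep_split pvK1 pvV1 pvK6 _ (pvOk_spec _ _ (by decide))]
  rw [pvRep_split pvK2 pvV2 pvK6 _ (pvOk_spec _ _ (by decide))]
  rw [pvRep_split pvK3 pvV3 pvK6 _ (pvOk_spec _ _ (by decide))]
  rw [pvRep_split pvK4 pvV4 pvK6 _ (pvOk_spec _ _ (by decide))]
  rw [pvRep_split pvK5 pvV5 pvK6 _ (pvOk_spec _ _ (by decide))]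
  rw [pvRep_pos pvK6 pvV6 _ (by decide) (List.prefix_append _ _), List.drop_left]

theorem pvStep_neg (k : List Char) (c : Char) (X t : List Char)
    (hk : k ≠ []) (htl : pvNoCap k.tail = true) (horig : ¬ k <+: c :: t)
    (hX : ∀ p, pvNoCap p = true → p <+: X → p <+: t) : ¬ k <+: c :: X := by
  intro hcon
  cases k with
  | nil => exact hk rfl
  | cons kc kt =>
    obtain ⟨he, hp⟩ := List.cons_prefix_cons.mp hcon
    exact horig (List.cons_prefix_cons.mpr ⟨he, hX kt (by simpa using htl) hp⟩)

theorem pvT_comp (k v X t : List Char) (hk : k ≠ []) (hv : pvCapHead v = true)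
    (h : ∀ p, pvNoCap p = true → p <+: X → p <+: t) :
    ∀ p, pvNoCap p = true → p <+: pvRep k v X → p <+: t :=
  fun p hp hpre => h p hp (pvRep_noCap_prefix k v hk hv X p hp hpre)

theorem pvChain_cons_neg (c : Char) (t : List Char)
    (h1 : ¬ pvK1 <+: (c :: t)) (h2 : ¬ pvK2 <+: (c :: t)) (h3 : ¬ pvK3 <+: (c :: t))
    (h4 : ¬ pvK4 <+: (c :: t)) (h5 : ¬ pvK5 <+: (c :: t)) (h6 : ¬ pvK6 <+: (c :: t)) :
    pvChain (c :: t) = c :: pvChain t := by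
  have T0 : ∀ p : List Char, pvNoCap p = true → p <+: t → p <+: t := fun _ _ h => h
  have T1 := pvT_comp pvK1 pvV1 t t (by decide) (by decide) T0
  have T2 := pvT_comp pvK2 pvV2 _ t (by decide) (by decide) T1
  have T3 := pvT_comp pvK3 pvV3 _ t (by decide) (by decide) T2
  have T4 := pvT_comp pvK4 pvV4 _ t (by decide) (by decide) T3
  have T5 := pvT_comp pvK5 pvV5 _ t (by decide) (by decide) T4
  unfold pvChain
  rw [pvRep_neg pvK1 pvV1 c t h1]
  rw [pvRep_neg pvK2 pvV2 c _ (pvStep_neg pvK2 c _ t (by decide) (by decide) h2 T1)]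
  rw [pvRep_neg pvK3 pvV3 c _ (pvStep_neg pvK3 c _ t (by decide) (by decide) h3 T2)]
  rw [pvRep_neg pvK4 pvV4 c _ (pvStep_neg pvK4 c _ t (by decide) (by decide) h4 T3)]
  rw [pvRep_neg pvK5 pvV5 c _ (pvStep_neg pvK5 c _ t (by decide) (by decide) h5 T4)]
  rw [pvRep_neg pvK6 pvV6 c _ (pvStep_neg pvK6 c _ t (by decide) (by decide) h6 T5)]

theorem pvChain_nil : pvChain [] = [] := by
  unfold pvChain
  simp [pvRep_nil]

theorem pvChain_eq_scan : ∀ l : List Char, pvChain l = pvScan l := by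
  suffices H : ∀ (n : Nat) (l : List Char), l.length ≤ n → pvChain l = pvScan l from
    fun l => H l.length l (Nat.le_refl _)
  intro n
  induction n with
  | zero =>
    intro l hl
    have : l = [] := List.eq_nil_of_length_eq_zero (Nat.le_zero.mp hl)
    subst this
    rw [pvChain_nil, pvScan_nil]
  | succ n ih =>
    intro l hl
    by_cases h1 : pvK1 <+: l
    · obtain ⟨r, rfl⟩ := h1
      rw [pvChain_app1, pvScan_app1]
      have hk : 1 ≤ pvK1.length := by decide
      simp only [List.length_append] at hl
      rw [ih r (by omega)]
    by_cases h2 : pvK2 <+: l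
    · obtain ⟨r, rfl⟩ := h2
      rw [pvChain_app2, pvScan_app2]
      have hk : 1 ≤ pvK2.length := by decide
      simp only [List.length_append] at hl
      rw [ih r (by omega)]
    by_cases h3 : pvK3 <+: l
    · obtain ⟨r, rfl⟩ := h3
      rw [pvChain_app3, pvScan_app3]
      have hk : 1 ≤ pvK3.length := by decide
      simp only [List.length_append] at hl
      rw [ih r (by omega)]
    by_cases h4 : pvK4 <+: l
    · obtain ⟨r, rfl⟩ := h4
      rw [pvChain_app4, pvScan_app4]
      have hk : 1 ≤ pvK4.length := by decide
      simp only [List.length_append] at hl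
      rw [ih r (by omega)]
    by_cases h5 : pvK5 <+: l
    · obtain ⟨r, rfl⟩ := h5
      rw [pvChain_app5, pvScan_app5]
      have hk : 1 ≤ pvK5.length := by decide
      simp only [List.length_append] at hl
      rw [ih r (by omega)]
    by_cases h6 : pvK6 <+: l
    · obtain ⟨r, rfl⟩ := h6
      rw [pvChain_app6, pvScan_app6]
      have hk : 1 ≤ pvK6.length := by decide
      simp only [List.length_append] at hl
      rw [ih r (by omega)]
    cases l with
    | nil => rw [pvChain_nil, pvScan_nil]
    | cons c t =>
      rw [pvChain_cons_neg c t h1 h2 h3 h4 h5 h6, pvScan_cons_neg c t h1 h2 h3 h4 h5 h6]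
      have : t.length ≤ n := by
        simp only [List.length_cons] at hl
        omega
      rw [ih t this]

theorem pvA_eq_chain (text : String) :
    soften_imperatives_py text = String.ofList (pvChain text.toList) := by
  have hitems : pvReplA.items =
      [("Avoid driving", "Try to avoid driving"), ("Do not drive", "Try not to drive"),
       ("You must", "You may need to"), ("You should", "You might"),
       ("Start ", "Your care team may start "), ("Stop ", "Your care team may adjust or stop ")] := by
    decide
  unfold soften_imperatives_py
  rw [hitems]
  simp only [List.foldl, PySem.Str.replace, String.toList_ofList]
  unfold pvChain
  rw [pvReplace_eq_rep _ _ _ (by decide), pvReplace_eq_rep _ _ _ (by decide),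
      pvReplace_eq_rep _ _ _ (by decide), pvReplace_eq_rep _ _ _ (by decide),
      pvReplace_eq_rep _ _ _ (by decide), pvReplace_eq_rep _ _ _ (by decide)]
  simp only [pvK1, pvV1, pvK2, pvV2, pvK3, pvV3, pvK4, pvV4, pvK5, pvV5, pvK6, pvV6]

-- ===== VERDICT (by name: the statement is the Claim_ definition above) =====
theorem soften_imperatives_py_spec : Claim_equal_soften_imperatives_py := by
  intro text _
  unfold Spec_soften_imperatives_py
  rw [pvA_eq_chain]
  unfold soften_imperatives_py_alt
  exact congrArg _ (pvChain_eq_scan _)
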